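-- pv_equiv track=rewrite | github.com/kaluginpeter/Algorithms_and_structures_tasks | Python_Solutions/Codeforces/381A._Sereja_and_Dima.py | solution
-- ===== SOURCE A (Python) =====
-- def solution(n: int, cards: list) -> str:
--     dima: int = 0
--     serj: int = 0
--     flag: bool = True
--     left: int = 0
--     right: int = n - 1
--     while left <= right:
--         if cards[left] > cards[right]:
--             current_card: int = cards[left]
--             left += 1
--         else:
--             current_card: int = cards[right]
--             right -= 1
--         if flag:
--             serj += current_card
--         else:
--             dima += current_card
--         flag = not flag
--     return f'{serj} {dima}'
-- ===== SOURCE B (Python) =====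
-- def solution(n: int, cards: list) -> str:
--     lo, hi = 0, n - 1
--     picks = []                      # cards in the order they are taken
--     for _ in range(n):
--         if cards[lo] > cards[hi]:
--             picks.append(cards[lo])
--             lo += 1
--         else:
--             picks.append(cards[hi])
--             hi -= 1
--     # walk the picks backwards, swapping current-picker and opponent totals
--     mine, other = 0, 0
--     for card in reversed(picks):
--         mine, other = card + other, mine
--     return f'{mine} {other}'
-- ===== Notes on version B (the rewrite author's own statement) =====
-- stated objective: alternative
-- what changed: Replaces A's single loop that tallies each card to Sereja or Dima via an alternating boolean flag with two passes: a counted two-pointer loop that only records the picked cards in order, then a backward fold over the picks that swaps the current-picker/opponent accumulators at every card; Pre_ excludes only n > len(cards), where both raise IndexError.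
import Mathlib
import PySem

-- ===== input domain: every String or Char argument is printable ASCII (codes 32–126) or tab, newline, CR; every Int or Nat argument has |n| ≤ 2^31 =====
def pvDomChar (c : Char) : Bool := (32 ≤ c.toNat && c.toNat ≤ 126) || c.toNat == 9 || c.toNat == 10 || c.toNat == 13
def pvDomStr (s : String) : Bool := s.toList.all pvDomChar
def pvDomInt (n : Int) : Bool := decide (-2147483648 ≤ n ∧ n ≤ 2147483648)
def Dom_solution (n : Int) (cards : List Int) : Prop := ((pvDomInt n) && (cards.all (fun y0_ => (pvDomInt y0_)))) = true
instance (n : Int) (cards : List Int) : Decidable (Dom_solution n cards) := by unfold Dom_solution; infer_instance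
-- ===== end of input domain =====

-- B replaces A's inline flag-alternating tally by two passes: a counted two-pointer loop
-- collecting the picked cards in order, then a backward fold that swaps the two score
-- accumulators at each card (objective: alternative).

-- ===== PORT A =====
-- A's while-loop: state (left, right, serj, dima, flag); cards[i] via pyGetD
-- (the default is never reached inside Pre_, where every index used is in range)
-- fuel = (right + 1 - left).toNat at entry: exactly the number of loop iterations;
-- it only makes the recursion structural, the loop guard left ≤ right is unchanged
def solutionLoop (cards : List Int) (fuel : Nat) (left right serj dima : Int) (flag : Bool) :
    Int × Int :=
  match fuel with
  | 0 => (serj, dima)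
  | Nat.succ f =>
    if left ≤ right then
      let cl := PySem.List.pyGetD cards left 0
      let cr := PySem.List.pyGetD cards right 0
      if cl > cr then
        if flag then solutionLoop cards f (left + 1) right (serj + cl) dima false
        else solutionLoop cards f (left + 1) right serj (dima + cl) true
      else
        if flag then solutionLoop cards f left (right - 1) (serj + cr) dima false
        else solutionLoop cards f left (right - 1) serj (dima + cr) true
    else (serj, dima)

def solution (n : Int) (cards : List Int) : String :=
  let p := solutionLoop cards n.toNat 0 (n - 1) 0 0 true
  PySem.Int.toStr p.1 ++ " " ++ PySem.Int.toStr p.2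

-- ===== PORT B =====
-- B's first pass: 'for _ in range(n)' (n.toNat iterations, none for n ≤ 0),
-- appending the taken card to picks
def solutionPickLoop (cards : List Int) (cnt : Nat) (lo hi : Int) (picks : List Int) : List Int :=
  match cnt with
  | 0 => picks
  | Nat.succ c =>
    let cl := PySem.List.pyGetD cards lo 0
    let ch := PySem.List.pyGetD cards hi 0
    if cl > ch then solutionPickLoop cards c (lo + 1) hi (picks ++ [cl])
    else solutionPickLoop cards c lo (hi - 1) (picks ++ [ch])

def solution_alt (n : Int) (cards : List Int) : String :=
  let picks := solutionPickLoop cards n.toNat 0 (n - 1) []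
  -- 'for card in reversed(picks): mine, other = card + other, mine'
  let p := picks.reverse.foldl (fun (q : Int × Int) card => (card + q.2, q.1)) (0, 0)
  PySem.Int.toStr p.1 ++ " " ++ PySem.Int.toStr p.2

-- ===== PRECONDITION & SPEC =====
-- A raises IndexError exactly when n > len(cards) (it reads cards[n-1]); Pre_ excludes
-- only those inputs
def Pre_solution (n : Int) (cards : List Int) : Prop := n ≤ cards.length
instance (n : Int) (cards : List Int) : Decidable (Pre_solution n cards) := by
  unfold Pre_solution; infer_instance
def pvWitness_solution : Int × List Int := (4, [4, 1, 2, 10])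

def Spec_solution (n : Int) (cards : List Int) (out : String) : Prop := out = solution_alt n cards
instance (n : Int) (cards : List Int) (out : String) : Decidable (Spec_solution n cards out) := by unfold Spec_solution; infer_instance

-- ===== CLAIM (what is proved, stated in full; the proofs are below) =====
def Claim_equal_solution : Prop := ∀ (n : Int) (cards : List Int), Dom_solution n cards → Pre_solution n cards → Spec_solution n cards (solution n cards)

-- ===== LEMMAS AND PROOFS =====

-- the swap fold, head-first: what B's reversed-foldl pass computes
-- (picks.reverse.foldl f = picks.foldr (flip f) by List.foldl_reverse, which simp applies)
def swapF (picks : List Int) : Int × Int :=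
  picks.foldr (fun card q => (card + q.2, q.1)) ((0 : Int), (0 : Int))

lemma pickLoop_acc (cs : List Int) (cnt : Nat) :
    ∀ (lo hi : Int) (picks : List Int),
      solutionPickLoop cs cnt lo hi picks = picks ++ solutionPickLoop cs cnt lo hi [] := by
  induction cnt with
  | zero => intro lo hi picks; simp [solutionPickLoop]
  | succ c ih =>
    intro lo hi picks
    rw [solutionPickLoop, solutionPickLoop]
    simp only [List.nil_append]
    by_cases hc : PySem.List.pyGetD cs lo 0 > PySem.List.pyGetD cs hi 0
    · simp only [if_pos hc]
      rw [ih (lo + 1) hi (picks ++ [_]), ih (lo + 1) hi ([_])]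
      simp
    · simp only [if_neg hc]
      rw [ih lo (hi - 1) (picks ++ [_]), ih lo (hi - 1) ([_])]
      simp

lemma swapF_cons (c : Int) (ps : List Int) :
    swapF (c :: ps) = (c + (swapF ps).2, (swapF ps).1) := by
  simp [swapF]

-- invariant: A's loop on the segment [l..r] computes the swap fold of the picks of
-- that segment, credited to (serj, dima) according to the current flag
lemma solutionLoop_swapF (cards : List Int) (k : Nat) :
    ∀ (l r s d : Int) (flag : Bool), 0 ≤ l → (r + 1 - l).toNat = k →
    solutionLoop cards k l r s d flag =
      (let g := swapF (solutionPickLoop cards k l r [])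
       if flag then (s + g.1, d + g.2) else (s + g.2, d + g.1)) := by
  induction k with
  | zero =>
    intro l r s d flag hl hk
    cases flag <;> simp [solutionLoop, solutionPickLoop, swapF]
  | succ k ih =>
    intro l r s d flag hl hk
    have hlr : l ≤ r := by omega
    rw [solutionLoop, if_pos hlr, solutionPickLoop]
    simp only [List.nil_append]
    by_cases hc : PySem.List.pyGetD cards l 0 > PySem.List.pyGetD cards r 0
    · simp only [if_pos hc]
      rw [pickLoop_acc cards k (l + 1) r [_]]
      simp only [List.singleton_append]
      rw [swapF_cons]
      cases flag with
      | true =>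
        rw [if_pos rfl, ih (l + 1) r (s + PySem.List.pyGetD cards l 0) d false (by omega) (by omega)]
        dsimp only
        simp only [Bool.false_eq_true, if_false, if_true]
        rw [Prod.ext_iff]
        exact ⟨by ring, by ring⟩
      | false =>
        rw [if_neg (by simp), ih (l + 1) r s (d + PySem.List.pyGetD cards l 0) true (by omega) (by omega)]
        dsimp only
        simp only [Bool.false_eq_true, if_false, if_true]
        rw [Prod.ext_iff]
        exact ⟨by ring, by ring⟩
    · simp only [if_neg hc]
      rw [pickLoop_acc cards k l (r - 1) [_]]
      simp only [List.singleton_append]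
      rw [swapF_cons]
      cases flag with
      | true =>
        rw [if_pos rfl, ih l (r - 1) (s + PySem.List.pyGetD cards r 0) d false hl (by omega)]
        dsimp only
        simp only [Bool.false_eq_true, if_false, if_true]
        rw [Prod.ext_iff]
        exact ⟨by ring, by ring⟩
      | false =>
        rw [if_neg (by simp), ih l (r - 1) s (d + PySem.List.pyGetD cards r 0) true hl (by omega)]
        dsimp only
        simp only [Bool.false_eq_true, if_false, if_true]
        rw [Prod.ext_iff]
        exact ⟨by ring, by ring⟩

-- ===== VERDICT (by name: the statement is the Claim_ definition above) =====
theorem solution_spec : Claim_equal_solution := by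
  intro n cards _ _
  unfold Spec_solution solution solution_alt
  rw [solutionLoop_swapF cards n.toNat 0 (n - 1) 0 0 true (le_refl 0) (by omega)]
  simp [swapF]
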